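-- pv_equiv track=rewrite | github.com/CodecoolKRK20173/erp-mvc-tatianamarcinrafal | model/crm/crm.py | get_longest_name_id
-- ===== SOURCE A (Python) =====
-- def get_longest_name_id(table):
--     """
--         Question: What is the id of the customer with the longest name?
--
--         Args:
--             table (list): data table to work on
--
--         Returns:
--             string: id of the longest name (if there are more than one, return
--                 the last by alphabetical order of the names)
--         """
--     longest = 0
--     user_id = ""
--     for row in table:
--         name = row[1]
--         name = len(str(name))
--         if name > longest:
--             longest = name
--             user_id = str(row[0])
--     the_same_longest_name = []
--     user_id_longest_name = []
--     if longest != 0: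
--         for row in table:
--             name = row[1]
--             id_ = row[0]
--             if len(str(name)) == longest:
--                 the_same_longest_name.append(str(name))
--                 user_id_longest_name.append(str(id_))
--     if the_same_longest_name and user_id_longest_name:
--         name_id = list(zip(the_same_longest_name,user_id_longest_name))
--         id_alph_name = ""
--         alph_name = ""
--         for pair in name_id:
--             longest_name = pair[0]
--             longest_id = pair[1]
--             if longest_name > alph_name:
--                 alph_name = longest_name
--                 id_alph_name = longest_id
--
--     return id_alph_name
-- ===== SOURCE B (Python) =====
-- def get_longest_name_id(table):
--     best_len = 0
--     best_name = ""
--     for row in table: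
--         s = str(row[1])
--         L = len(s)
--         if L > best_len or (L == best_len and s > best_name):
--             best_len = L
--             best_name = s
--             best_id = str(row[0])
--     return best_id
-- ===== Notes on version B (the rewrite author's own statement) =====
-- stated objective: simpler
-- what changed: A's three passes (running-max of name lengths, a second pass collecting all max-length names and ids into two parallel lists, a third pass over their zip picking the alphabetically greatest name) are fused into one single scan that keeps (best_len, best_name, best_id) and updates on strictly longer or equal-length-and-alphabetically-greater names.
import Mathlib
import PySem

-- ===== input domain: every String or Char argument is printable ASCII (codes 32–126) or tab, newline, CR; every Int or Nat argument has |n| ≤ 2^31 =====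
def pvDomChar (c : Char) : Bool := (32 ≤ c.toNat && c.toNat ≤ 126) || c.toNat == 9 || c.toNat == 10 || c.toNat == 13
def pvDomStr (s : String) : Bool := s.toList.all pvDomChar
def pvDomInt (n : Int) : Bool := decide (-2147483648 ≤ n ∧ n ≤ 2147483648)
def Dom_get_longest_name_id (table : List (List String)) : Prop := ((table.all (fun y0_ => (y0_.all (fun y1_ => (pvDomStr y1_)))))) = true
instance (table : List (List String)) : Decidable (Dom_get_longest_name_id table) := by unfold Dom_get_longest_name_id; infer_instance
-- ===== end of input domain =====

-- B replaces A's three passes (max length, filter, alphabetical scan) by one fused scan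
-- keeping (best length, best name, best id); objective: simpler.

-- shared primitive helpers (used by both ports):
-- row[i]: IndexError (pyGet? = none) is excluded by Pre_, the default is never reached there
def pvCell (row : List String) (i : Int) : String := (PySem.List.pyGet? row i).getD ""
-- Python's '<' on strings: lexicographic comparison of code points (exact; Lean's String.lt
-- is kernel-opaque, so the comparison is spelled out on the character lists)
def pvLtChars : List Char → List Char → Bool
  | [], [] => false
  | [], _ :: _ => true
  | _ :: _, [] => false
  | a :: as, b :: bs => if a < b then true else if b < a then false else pvLtChars as bs
def pvStrLt (a b : String) : Bool := pvLtChars a.toList b.toList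

-- ===== PORT A =====
def get_longest_name_id (table : List (List String)) : String :=
  -- loop 1: longest = 0; user_id = "" ; if len(name) > longest: update
  let fst := table.foldl (fun (st : Int × String) row =>
      let name := pvCell row 1
      let n := PySem.Str.len name
      if n > st.1 then (n, pvCell row 0) else st) (0, "")
  let longest := fst.1
  -- loop 2: collect names/ids of rows whose name length equals longest
  let lists : List String × List String :=
    if longest ≠ 0 then
      table.foldl (fun (acc : List String × List String) row =>
        let name := pvCell row 1
        let id_ := pvCell row 0
        if PySem.Str.len name = longest then (acc.1 ++ [name], acc.2 ++ [id_]) else acc)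
        ([], [])
    else ([], [])
  -- loop 3: pick the alphabetically greatest name (strict '>', first wins on equal names)
  if lists.1 ≠ [] ∧ lists.2 ≠ [] then
    let name_id := lists.1.zip lists.2
    (name_id.foldl (fun (st : String × String) pair =>
        if pvStrLt st.1 pair.1 then (pair.1, pair.2) else st) ("", "")).2
  else ""  -- Python: id_alph_name is unbound here (UnboundLocalError); excluded by Pre_

-- ===== PORT B =====
def get_longest_name_id_alt (table : List (List String)) : String :=
  -- single fused scan over the table keeping (best_len, best_name, best_id)
  (table.foldl (fun (st : Int × String × String) row =>
      let s := pvCell row 1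
      let L := PySem.Str.len s
      if L > st.1 ∨ (L = st.1 ∧ pvStrLt st.2.1 s) then (L, s, pvCell row 0) else st)
    (0, "", "")).2.2
  -- Python B's best_id is unbound when no row has a nonempty name (UnboundLocalError,
  -- same as A); excluded by Pre_, where this initial "" is never returned

-- ===== PRECONDITION & SPEC =====
-- Pre_ excludes exactly the inputs where the Python raises: a row with fewer than two
-- cells (row[1] / row[0] raise IndexError), and tables with no nonempty name in column 1
-- (both A's id_alph_name and B's best_id stay unbound: UnboundLocalError).
def Pre_get_longest_name_id (table : List (List String)) : Prop :=
  (∀ row ∈ table, 2 ≤ row.length) ∧ (∃ row ∈ table, pvCell row 1 ≠ "")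
instance (table : List (List String)) : Decidable (Pre_get_longest_name_id table) := by
  unfold Pre_get_longest_name_id; infer_instance

def pvWitness_get_longest_name_id : List (List String) := [["1", "Alice"], ["2", "Bob"]]

def Spec_get_longest_name_id (table : List (List String)) (out : String) : Prop := out = get_longest_name_id_alt table
instance (table : List (List String)) (out : String) : Decidable (Spec_get_longest_name_id table out) := by unfold Spec_get_longest_name_id; infer_instance

-- ===== CLAIM (what is proved, stated in full; the proofs are below) =====
def Claim_equal_get_longest_name_id : Prop := ∀ (table : List (List String)), Dom_get_longest_name_id table → Pre_get_longest_name_id table → Spec_get_longest_name_id table (get_longest_name_id table)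

-- ===== LEMMAS AND PROOFS =====

-- the (name, id) pairs of the table, and the three abstract loop steps
def pvPairs (table : List (List String)) : List (String × String) :=
  table.map (fun row => (pvCell row 1, pvCell row 0))
def pvLen (p : String × String) : Int := PySem.Str.len p.1
def pvBstep (st : Int × String × String) (p : String × String) : Int × String × String :=
  if pvLen p > st.1 ∨ (pvLen p = st.1 ∧ pvStrLt st.2.1 p.1) then (pvLen p, p.1, p.2) else st
def pvAstep (st : String × String) (p : String × String) : String × String :=
  if pvStrLt st.1 p.1 then (p.1, p.2) else st
def pvMax (P : List (String × String)) : Int := P.foldl (fun m p => max m (pvLen p)) 0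

lemma pvInit_le (P : List (String × String)) (a : Int) :
    a ≤ P.foldl (fun m p => max m (pvLen p)) a := by
  induction P generalizing a with
  | nil => simp
  | cons p P ih => exact le_trans (le_max_left _ _) (ih _)

lemma pvMem_le (P : List (String × String)) (a : Int) (q : String × String) (hq : q ∈ P) :
    pvLen q ≤ P.foldl (fun m p => max m (pvLen p)) a := by
  induction hq generalizing a with
  | head => exact le_trans (le_max_right _ _) (pvInit_le _ _)
  | tail p hmem ih => exact ih _

lemma pvStrLt_empty (s : String) (h : s.toList ≠ []) : pvStrLt "" s = true := by
  unfold pvStrLt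
  cases hs : s.toList with
  | nil => exact absurd hs h
  | cons c cs => simp [pvLtChars]

lemma pvLen_pos_ne_empty (p : String × String) (h : 0 < pvLen p) : p.1.toList ≠ [] := by
  simp only [pvLen, PySem.Str.len_eq] at h
  intro hc; rw [hc] at h; simp at h

-- main invariant: the fused scan computes the max length together with the
-- alphabetical scan over the rows achieving it
lemma pvMain (P : List (String × String)) :
    P.foldl pvBstep (0, "", "") =
      (pvMax P, (P.filter (fun p => pvLen p == pvMax P)).foldl pvAstep ("", "")) := by
  induction P using List.reverseRecOn with
  | nil => simp [pvMax]
  | append_singleton P p ih =>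
    have hmax : pvMax (P ++ [p]) = max (pvMax P) (pvLen p) := by
      simp [pvMax, List.foldl_append]
    rcases lt_trichotomy (pvMax P) (pvLen p) with h | h | h
    · -- strictly longer: new max, the old filter is empty
      have hm : pvMax (P ++ [p]) = pvLen p := by rw [hmax]; omega
      have hfilP : P.filter (fun q => pvLen q == pvMax (P ++ [p])) = [] := by
        rw [List.filter_eq_nil_iff]
        intro q hq hbe
        have := pvMem_le P 0 q hq
        rw [hm] at hbe
        have : pvLen q = pvLen p := by simpa using hbe
        have hle : pvLen q ≤ pvMax P := pvMem_le P 0 q hq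
        omega
      have hne : p.1.toList ≠ [] := by
        apply pvLen_pos_ne_empty
        have := pvInit_le P 0
        have : (0 : Int) ≤ pvMax P := this
        omega
      rw [List.foldl_append, ih, List.filter_append, hfilP]
      simp only [List.foldl, List.filter, hm]
      simp [pvBstep, pvAstep, h, pvStrLt_empty _ hne]
    · -- equal length: the new row joins the filter, both sides do the same comparison
      have hm : pvMax (P ++ [p]) = pvMax P := by rw [hmax]; omega
      rw [List.foldl_append, ih, List.filter_append, hm]
      have hcond : (pvLen p == pvMax P) = true := by simp [h]
      simp only [List.filter, hcond, List.foldl_append, List.foldl]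
      simp only [pvBstep, pvAstep, h]
      split_ifs with h1 h2 h2 <;> simp_all
    · -- strictly shorter: nothing changes on either side
      have hm : pvMax (P ++ [p]) = pvMax P := by rw [hmax]; omega
      rw [List.foldl_append, ih, List.filter_append, hm]
      have hcond : (pvLen p == pvMax P) = false := by simp; omega
      simp only [List.filter, hcond, List.foldl]
      simp only [pvBstep]
      rw [if_neg]
      · simp
      · rintro (h1 | ⟨h2, -⟩) <;> omega

-- loop 1 of A computes pvMax
lemma pvLoop1 (table : List (List String)) (a : Int × String) :
    (table.foldl (fun (st : Int × String) row =>
        let name := pvCell row 1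
        let n := PySem.Str.len name
        if n > st.1 then (n, pvCell row 0) else st) a).1
      = (pvPairs table).foldl (fun m p => max m (pvLen p)) a.1 := by
  induction table generalizing a with
  | nil => simp [pvPairs]
  | cons row t ih =>
    simp only [List.foldl, pvPairs, List.map]
    rw [ih]
    congr 1
    simp only [pvLen]
    split_ifs with h <;> omega

-- loop 2 of A builds the two columns of the filtered pair list
lemma pvLoop2 (table : List (List String)) (L : Int) (acc : List String × List String) :
    table.foldl (fun (acc : List String × List String) row =>
        let name := pvCell row 1
        let id_ := pvCell row 0
        if PySem.Str.len name = L then (acc.1 ++ [name], acc.2 ++ [id_]) else acc) acc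
      = (acc.1 ++ ((pvPairs table).filter (fun p => pvLen p == L)).map Prod.fst,
         acc.2 ++ ((pvPairs table).filter (fun p => pvLen p == L)).map Prod.snd) := by
  induction table generalizing acc with
  | nil => simp [pvPairs]
  | cons row t ih =>
    simp only [List.foldl]
    rw [ih]
    have hp : pvPairs (row :: t) = (pvCell row 1, pvCell row 0) :: pvPairs t := rfl
    rw [hp, List.filter_cons]
    by_cases h : PySem.Str.len (pvCell row 1) = L
    · have hb : (pvLen (pvCell row 1, pvCell row 0) == L) = true := by
        simp only [pvLen]; exact beq_iff_eq.mpr h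
      simp only [hb, if_pos h, if_true, List.map_cons]
      simp
    · have hb : (pvLen (pvCell row 1, pvCell row 0) == L) = false := by
        simp only [pvLen]; exact beq_eq_false_iff_ne.mpr h
      simp only [hb, if_neg h, Bool.false_eq_true]
      simp

lemma pvZipSelf (Q : List (String × String)) :
    (Q.map Prod.fst).zip (Q.map Prod.snd) = Q := by
  induction Q with
  | nil => rfl
  | cons q Q ih => simp [ih]

-- the max is attained when it is nonzero
lemma pvAttained (P : List (String × String)) (a : Int) :
    P.foldl (fun m p => max m (pvLen p)) a = a ∨
      ∃ q ∈ P, pvLen q = P.foldl (fun m p => max m (pvLen p)) a := by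
  induction P generalizing a with
  | nil => left; rfl
  | cons p P ih =>
    rcases ih (max a (pvLen p)) with h | ⟨q, hq, hlen⟩
    · simp only [List.foldl, h]
      rcases (by omega : pvLen p ≤ a ∨ a < pvLen p) with hle | hlt
      · left; omega
      · right; exact ⟨p, by simp, by omega⟩
    · right; exact ⟨q, by simp [hq], hlen⟩

-- ===== VERDICT (by name: the statement is the Claim_ definition above) =====
theorem get_longest_name_id_spec : Claim_equal_get_longest_name_id := by
  intro table _ hpre
  obtain ⟨hlen, row₀, hrow₀, hname₀⟩ := hpre
  unfold Spec_get_longest_name_id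
  simp only [get_longest_name_id, get_longest_name_id_alt]
  -- B's fold is the abstract fused scan over the pairs
  have hB : (table.foldl (fun (st : Int × String × String) row =>
      let s := pvCell row 1
      let L := PySem.Str.len s
      if L > st.1 ∨ (L = st.1 ∧ pvStrLt st.2.1 s) then (L, s, pvCell row 0) else st)
      (0, "", "")) = (pvPairs table).foldl pvBstep (0, "", "") := by
    rw [pvPairs, List.foldl_map]
    rfl
  rw [hB, pvMain]
  set P := pvPairs table with hP
  -- the max length is positive (row₀'s name is nonempty)
  have hmem : (pvCell row₀ 1, pvCell row₀ 0) ∈ P := by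
    rw [hP, pvPairs]
    exact List.mem_map.mpr ⟨row₀, hrow₀, rfl⟩
  have hpos : 0 < pvMax P := by
    have h1 : pvLen (pvCell row₀ 1, pvCell row₀ 0) ≤ pvMax P := pvMem_le P 0 _ hmem
    have h2 : 0 < pvLen (pvCell row₀ 1, pvCell row₀ 0) := by
      simp only [pvLen, PySem.Str.len_eq]
      have hne : (pvCell row₀ 1).toList ≠ [] := fun hc => hname₀ (String.toList_inj.mp hc)
      have : (pvCell row₀ 1).toList.length ≠ 0 := by simpa using hne
      omega
    omega
  have hMne : pvMax P ≠ 0 := by omega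
  -- A's loop 1 computes pvMax
  have hL1 : (table.foldl (fun (st : Int × String) row =>
      let name := pvCell row 1
      let n := PySem.Str.len name
      if n > st.1 then (n, pvCell row 0) else st) (0, "")).1 = pvMax P := by
    rw [pvLoop1]; rfl
  rw [hL1, if_pos hMne, pvLoop2 table (pvMax P) ([], [])]
  simp only [List.nil_append]
  -- the filtered list is nonempty: the max is attained
  have hQne : P.filter (fun p => pvLen p == pvMax P) ≠ [] := by
    rcases pvAttained P 0 with h | ⟨q, hq, hlq⟩
    · exact absurd h hMne
    · intro hc
      have : q ∈ P.filter (fun p => pvLen p == pvMax P) :=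
        List.mem_filter.mpr ⟨hq, by simp [hlq, pvMax]⟩
      rw [hc] at this; simp at this
  have h1 : (P.filter (fun p => pvLen p == pvMax P)).map Prod.fst ≠ [] := by
    simpa using hQne
  have h2 : (P.filter (fun p => pvLen p == pvMax P)).map Prod.snd ≠ [] := by
    simpa using hQne
  rw [if_pos ⟨h1, h2⟩, pvZipSelf]
  rfl
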